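-- pv_equiv track=rewrite | github.com/RDbtx/NetworkSec | attacks/extract_malicious_packets.py | frames_to_ranges
-- ===== SOURCE A (Python) =====
-- def frames_to_ranges(frame_numbers: list) -> list:
--     """Convert sorted frame numbers to editcap range strings e.g. [1,2,3,5] -> ['1-3','5']"""
--     if not frame_numbers:
--         return []
--     ranges = []
--     start = prev = frame_numbers[0]
--     for n in frame_numbers[1:]:
--         if n == prev + 1:
--             prev = n
--         else:
--             ranges.append(f"{start}-{prev}" if start != prev else str(start))
--             start = prev = n
--     ranges.append(f"{start}-{prev}" if start != prev else str(start))
--     return ranges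
-- ===== SOURCE B (Python) =====
-- def frames_to_ranges(frame_numbers: list) -> list:
--     """Convert sorted frame numbers to editcap range strings e.g. [1,2,3,5] -> ['1-3','5']"""
--     # stage 1: split the input into maximal consecutive runs (a list of runs)
--     runs = []
--     for n in frame_numbers:
--         if runs and n == runs[-1][-1] + 1:
--             runs[-1].append(n)
--         else:
--             runs.append([n])
--     # stage 2: format each run from its endpoints
--     return [str(r[0]) if r[0] == r[-1] else f"{r[0]}-{r[-1]}" for r in runs]
-- ===== Notes on version B (the rewrite author's own statement) =====
-- stated objective: alternative
-- what changed: Replaces A's single-pass start/prev state machine that formats on the fly with a two-stage group-then-format pipeline: first pass materializes the maximal consecutive runs as a list of lists, second pass formats each run from its endpoints, so no carried start/prev state and no duplicated trailing append.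
import Mathlib
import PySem

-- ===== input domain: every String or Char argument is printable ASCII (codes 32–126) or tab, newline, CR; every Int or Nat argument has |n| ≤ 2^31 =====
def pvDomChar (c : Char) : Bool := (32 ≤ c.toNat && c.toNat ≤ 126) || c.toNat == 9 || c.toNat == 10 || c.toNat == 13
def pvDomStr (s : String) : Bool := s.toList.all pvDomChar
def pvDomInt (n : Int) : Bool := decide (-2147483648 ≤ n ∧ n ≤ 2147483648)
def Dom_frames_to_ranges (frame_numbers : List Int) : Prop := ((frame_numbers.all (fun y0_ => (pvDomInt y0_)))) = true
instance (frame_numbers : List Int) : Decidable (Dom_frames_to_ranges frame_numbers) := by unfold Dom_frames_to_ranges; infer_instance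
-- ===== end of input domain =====

-- B replaces A's start/prev state machine with a two-stage pipeline: split into maximal consecutive runs, then format each run (alternative decomposition, same O(n) cost).


-- ===== PORT A =====
-- f"{start}-{prev}" if start != prev else str(start)
def fmtA (start prev : Int) : String :=
  if start ≠ prev then PySem.Int.toStr start ++ "-" ++ PySem.Int.toStr prev
  else PySem.Int.toStr start

-- the for-loop over frame_numbers[1:] with state (start, prev, ranges), plus the trailing append
def loopA : List Int → Int → Int → List String → List String
  | [], start, prev, ranges => ranges ++ [fmtA start prev]
  | n :: rest, start, prev, ranges =>
    if n = prev + 1 then loopA rest start n ranges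
    else loopA rest n n (ranges ++ [fmtA start prev])

def frames_to_ranges (frame_numbers : List Int) : List String :=
  match frame_numbers with
  | [] => []
  | x :: rest => loopA rest x x []

-- ===== PORT B =====
-- loop body of stage 1: 'if runs and n == runs[-1][-1] + 1: runs[-1].append(n) else: runs.append([n])'
-- (runs[-1] is never empty here, so runs.getLast?.bind getLast? = some x ↔ 'runs and …' sees runs[-1][-1] = x)
def stepB (runs : List (List Int)) (n : Int) : List (List Int) :=
  match runs.getLast?.bind List.getLast? with
  | some x =>
    if n = x + 1 then runs.dropLast ++ [runs.getLast?.getD [] ++ [n]]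
    else runs ++ [[n]]
  | none => runs ++ [[n]]

-- stage 2 body: str(r[0]) if r[0] == r[-1] else f"{r[0]}-{r[-1]}"
-- (every run built by stage 1 is nonempty, so the catch-all "" is unreachable)
def fmtRun (r : List Int) : String :=
  match r.head?, r.getLast? with
  | some a, some b =>
    if a = b then PySem.Int.toStr a
    else PySem.Int.toStr a ++ "-" ++ PySem.Int.toStr b
  | _, _ => ""

def frames_to_ranges_alt (frame_numbers : List Int) : List String :=
  (frame_numbers.foldl stepB []).map fmtRun

-- ===== PRECONDITION & SPEC =====
def Spec_frames_to_ranges (frame_numbers : List Int) (out : List String) : Prop := out = frames_to_ranges_alt frame_numbers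
instance (frame_numbers : List Int) (out : List String) : Decidable (Spec_frames_to_ranges frame_numbers out) := by unfold Spec_frames_to_ranges; infer_instance

-- ===== CLAIM =====
def Claim_equal_frames_to_ranges : Prop := ∀ (frame_numbers : List Int), Dom_frames_to_ranges frame_numbers → Spec_frames_to_ranges frame_numbers (frames_to_ranges frame_numbers)

-- ===== LEMMAS AND PROOFS =====
theorem loopA_acc (rest : List Int) : ∀ (s p : Int) (acc : List String),
    loopA rest s p acc = acc ++ loopA rest s p [] := by
  induction rest with
  | nil => intro s p acc; simp [loopA]
  | cons n t ih =>
    intro s p acc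
    by_cases h : n = p + 1
    · simp only [loopA, if_pos h]; exact ih s n acc
    · simp only [loopA, if_neg h]
      rw [ih n n (acc ++ [fmtA s p])]
      conv_rhs => rw [List.nil_append, ih n n [fmtA s p]]
      simp [List.append_assoc]

-- stepB only looks at the last run, so a prefix of finished runs passes through unchanged
theorem stepB_pre (pre R : List (List Int)) (n : Int) (hR : R ≠ []) :
    stepB (pre ++ R) n = pre ++ stepB R n := by
  have h1 : (pre ++ R).getLast? = R.getLast? := List.getLast?_append_of_ne_nil _ hR
  have h2 : (pre ++ R).dropLast = pre ++ R.dropLast := List.dropLast_append_of_ne_nil hR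
  unfold stepB
  rw [h1, h2]
  cases h : R.getLast?.bind List.getLast? with
  | none => simp
  | some x =>
    by_cases hn : n = x + 1 <;> simp [hn, List.append_assoc]

theorem stepB_ne_nil (R : List (List Int)) (n : Int) : stepB R n ≠ [] := by
  unfold stepB
  cases R.getLast?.bind List.getLast? with
  | none => simp
  | some x => by_cases hn : n = x + 1 <;> simp [hn]

theorem foldl_stepB_pre (t : List Int) : ∀ (pre R : List (List Int)), R ≠ [] →
    List.foldl stepB (pre ++ R) t = pre ++ List.foldl stepB R t := by
  induction t with
  | nil => intro pre R _; simp
  | cons n t ih =>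
    intro pre R hR
    simp only [List.foldl_cons]
    rw [stepB_pre pre R n hR, ih pre (stepB R n) (stepB_ne_nil R n)]

theorem fmtRun_eq (cur : List Int) (s p : Int) (hh : cur.head? = some s)
    (hl : cur.getLast? = some p) : fmtRun cur = fmtA s p := by
  unfold fmtRun fmtA
  rw [hh, hl]
  by_cases h : s = p <;> simp [h]

-- A's loop on the tail, with current run endpoints (s, p), equals B's pipeline continued
-- from the single partial run cur (whose head is s and last is p).
theorem loopA_eq (rest : List Int) : ∀ (cur : List Int) (s p : Int),
    cur.head? = some s → cur.getLast? = some p →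
    loopA rest s p [] = (List.foldl stepB [cur] rest).map fmtRun := by
  induction rest with
  | nil =>
    intro cur s p hh hl
    simp [loopA, fmtRun_eq cur s p hh hl]
  | cons n t ih =>
    intro cur s p hh hl
    have hcur : cur ≠ [] := by intro h; rw [h] at hh; simp at hh
    by_cases h : n = p + 1
    · simp only [loopA, if_pos h, List.foldl_cons]
      have hstep : stepB [cur] n = [cur ++ [n]] := by
        unfold stepB
        simp [hl, h]
      rw [hstep]
      exact ih (cur ++ [n]) s n (by simp [List.head?_append_of_ne_nil _ hcur, hh]) (by simp)
    · simp only [loopA, if_neg h, List.foldl_cons]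
      have hstep : stepB [cur] n = [cur] ++ [[n]] := by
        unfold stepB
        simp [hl, h]
      rw [hstep, loopA_acc, foldl_stepB_pre t [cur] [[n]] (by simp)]
      simp [fmtRun_eq cur s p hh hl, ih [n] n n rfl rfl]

-- ===== VERDICT =====
theorem frames_to_ranges_spec : Claim_equal_frames_to_ranges := by
  intro xs _
  unfold Spec_frames_to_ranges
  cases xs with
  | nil => simp [frames_to_ranges, frames_to_ranges_alt]
  | cons x rest =>
    show loopA rest x x [] = frames_to_ranges_alt (x :: rest)
    unfold frames_to_ranges_alt
    have h0 : stepB [] x = [[x]] := by unfold stepB; simp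
    rw [List.foldl_cons, h0]
    exact loopA_eq rest [x] x x rfl rfl
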